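-- pv_equiv track=rewrite | github.com/liuyubobobo/OJ-Project-Euler | 077-Prime-Summations_20150816.py | solve
-- ===== SOURCE A (Python) =====
-- def primesSieve(N):
--     ## N included!
--     if N < 2 : return []
--     elif N == 2: return [2]
--
--     sieve = [False] * (N+1)
--     sieve[0] = True
--     sieve[1] = True
--     for i in range(4,N+1,2):
--         sieve[i] = True
--
--     n = 3
--     while n*n <= N:
--         if sieve[n] == False:
--             for i in range(n*n,N+1,2*n):
--                 sieve[i] = True
--         n += 2
--
--     res = [2]
--     for n in range(3,N,2):
--         if not sieve[n]:
--             res.append(n)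
--     return sieve , res
--
-- def solve( N ):
--
--     sieve , primes = primesSieve(N)
--
--     res = [ [0]*(N+1) for i in range( len(primes) ) ]
--     for i in range( N + 1 ):
--         if i%2 == 0:
--             res[0][i] = 1
--
--     for i in range( len(primes) ):
--         res[i][0] = 1
--
--     ans = N + 1
--
--     for i in range( 1 , len(primes) ):
--         for j in range( 1 , N + 1 ):
--             res[i][j] = res[i-1][j] + ( res[i][j-primes[i]] if j-primes[i] >= 0 else 0 )
--
--             if not sieve[j] and res[i][j] - 1 > 5000:
--                 ans = min( ans , j )
--             elif res[i][j] > 5000: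
--                 ans = min( ans , j )
--
--     return ans
-- ===== SOURCE B (Python) =====
-- def primesSieve(N):
--     ## N included!
--     if N < 2 : return []
--     elif N == 2: return [2]
--
--     sieve = [False] * (N+1)
--     sieve[0] = True
--     sieve[1] = True
--     for i in range(4,N+1,2):
--         sieve[i] = True
--
--     n = 3
--     while n*n <= N:
--         if sieve[n] == False:
--             for i in range(n*n,N+1,2*n):
--                 sieve[i] = True
--         n += 2
--
--     res = [2]
--     for n in range(3,N,2):
--         if not sieve[n]:
--             res.append(n)
--     return sieve , res
--
-- def solve( N ):
--     # keep the tuple unpack (same ValueError for N <= 2); the sieve itself is not needed: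
--     # A's two-branch threshold test reduces to counts > 5000 in both branches.
--     sieve, primes = primesSieve(N)
--
--     # full prime-partition table in a single 1D array
--     counts = [0] * (N + 1)
--     counts[0] = 1
--     for p in primes:
--         for j in range(p, N + 1):
--             counts[j] += counts[j - p]
--
--     # first j whose number of prime summations exceeds 5000
--     for j in range(1, N + 1):
--         if counts[j] > 5000:
--             return j
--     return N + 1
-- ===== Notes on version B (the rewrite author's own statement) =====
-- stated objective: faster
-- what changed: Replaces A's 2D per-prime DP table with the min-search fused into the inner loop by a single 1D partition-count array plus a separate ascending first-hit scan that exits early; since A's if/elif threshold test reduces to counts>5000 in both branches, the sieve test disappears from the search.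
import Mathlib
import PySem

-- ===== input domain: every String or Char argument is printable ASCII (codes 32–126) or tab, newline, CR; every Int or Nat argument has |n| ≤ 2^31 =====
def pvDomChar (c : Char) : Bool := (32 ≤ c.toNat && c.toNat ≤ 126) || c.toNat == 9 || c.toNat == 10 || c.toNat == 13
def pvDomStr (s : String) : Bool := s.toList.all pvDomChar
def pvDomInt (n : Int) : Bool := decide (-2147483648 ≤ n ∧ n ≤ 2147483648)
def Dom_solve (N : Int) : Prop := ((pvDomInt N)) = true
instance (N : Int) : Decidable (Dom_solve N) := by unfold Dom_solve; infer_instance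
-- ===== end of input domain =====

-- B replaces A's 2D per-prime table with fused min-search by a 1D count array plus a
-- separate ascending first-hit scan (A's if/elif threshold reduces to counts > 5000);
-- measurably faster by a constant factor. Pre_ excludes N ≤ 2, where both raise ValueError.


-- ===== PORT A =====
-- the 'while n*n <= N' loop of primesSieve
def pvSieveLoop (N : Int) (sieve : List Bool) (n : Int) : List Bool :=
  if h : n * n ≤ N then
    let sieve' := if PySem.List.pyGetD sieve n true = false then
        (PySem.List.pyRange (n*n) (N+1) (2*n)).foldl (fun s i => PySem.List.pySetD s i true) sieve
      else sieve
    pvSieveLoop N sieve' (n+2)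
  else sieve
termination_by (N + 2 - n).toNat
decreasing_by
  have h0 : 0 ≤ N := le_trans (mul_self_nonneg n) h
  have h1 : 2*n - 1 ≤ N := by nlinarith
  omega

-- shared helper: Source B's primesSieve is textually identical to A's, so both ports call this one
-- definition.  Python returns [] for N < 2 and [2] for N == 2; on those solve's 2-tuple unpack
-- raises ValueError (outside Pre_), represented here by the junk value ([], []).
def primesSieve (N : Int) : List Bool × List Int :=
  if N < 2 then ([], [])
  else if N = 2 then ([], [])
  else
    let sieve := List.replicate (N+1).toNat false
    let sieve := PySem.List.pySetD sieve 0 true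
    let sieve := PySem.List.pySetD sieve 1 true
    let sieve := (PySem.List.pyRange 4 (N+1) 2).foldl
      (fun s i => PySem.List.pySetD s i true) sieve
    let sieve := pvSieveLoop N sieve 3
    let res : List Int := [2]
    let res := (PySem.List.pyRange 3 N 2).foldl
      (fun r n => if PySem.List.pyGetD sieve n true = false then r ++ [n] else r) res
    (sieve, res)

def solve (N : Int) : Int :=
  let sp := primesSieve N
  let sieve := sp.1
  let primes := sp.2
  -- res = [ [0]*(N+1) for i in range(len(primes)) ]
  let res : List (List Int) :=
    (PySem.List.pyRange 0 primes.length 1).map (fun _ => List.replicate (N+1).toNat (0:Int))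
  -- for i in range(N+1): if i % 2 == 0: res[0][i] = 1
  let res := (PySem.List.pyRange 0 (N+1) 1).foldl
    (fun r i => if PySem.Int.mod i 2 = 0 then
        PySem.List.pySetD r 0 (PySem.List.pySetD (PySem.List.pyGetD r 0 []) i 1) else r) res
  -- for i in range(len(primes)): res[i][0] = 1
  let res := (PySem.List.pyRange 0 primes.length 1).foldl
    (fun r i => PySem.List.pySetD r i (PySem.List.pySetD (PySem.List.pyGetD r i []) 0 1)) res
  let ans : Int := N + 1
  let st := (PySem.List.pyRange 1 primes.length 1).foldl (fun st i =>
      (PySem.List.pyRange 1 (N+1) 1).foldl (fun st j =>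
        let p := PySem.List.pyGetD primes i 0
        let v := PySem.List.pyGetD (PySem.List.pyGetD st.1 (i-1) []) j 0 +
                 (if j - p ≥ 0 then PySem.List.pyGetD (PySem.List.pyGetD st.1 i []) (j - p) 0
                  else 0)
        let res' := PySem.List.pySetD st.1 i
          (PySem.List.pySetD (PySem.List.pyGetD st.1 i []) j v)
        let ans' := if PySem.List.pyGetD sieve j true = false ∧ v - 1 > 5000 then min st.2 j
                    else if v > 5000 then min st.2 j else st.2
        (res', ans')) st) (res, ans)
  st.2

-- ===== PORT B =====
def solve_alt (N : Int) : Int :=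
  let sp := primesSieve N   -- same unpack; sieve is not used by B's search
  let primes := sp.2
  -- counts = [0]*(N+1); counts[0] = 1
  let counts := PySem.List.pySetD (List.replicate (N+1).toNat (0:Int)) 0 1
  -- for p in primes: for j in range(p, N+1): counts[j] += counts[j-p]
  let counts := primes.foldl (fun c p =>
      (PySem.List.pyRange p (N+1) 1).foldl
        (fun c j => PySem.List.pySetD c j
          (PySem.List.pyGetD c j 0 + PySem.List.pyGetD c (j - p) 0)) c) counts
  -- for j in range(1, N+1): if counts[j] > 5000: return j;  return N+1
  ((PySem.List.pyRange 1 (N+1) 1).find?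
      (fun j => decide (PySem.List.pyGetD counts j 0 > 5000))).getD (N + 1)

-- ===== PRECONDITION & SPEC =====
-- Pre_ excludes exactly N ≤ 2, where Python A raises ValueError (primesSieve returns a
-- list of length ≠ 2 and the unpacking 'sieve, primes = ...' fails).
def Pre_solve (N : Int) : Prop := 3 ≤ N
instance (N : Int) : Decidable (Pre_solve N) := by unfold Pre_solve; infer_instance
def pvWitness_solve : Int := 10
def Spec_solve (N : Int) (out : Int) : Prop := out = solve_alt N
instance (N : Int) (out : Int) : Decidable (Spec_solve N out) := by unfold Spec_solve; infer_instance

-- ===== CLAIM (what is proved, stated in full; the proofs are below) =====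
def Claim_equal_solve : Prop := ∀ (N : Int), Dom_solve N → Pre_solve N → Spec_solve N (solve N)

-- ===== LEMMAS AND PROOFS =====


-- ---------- DP model: pvRow p f = one unbounded-coin pass with coin p over table f ----------
def pvBase : Nat → Int := fun j => if j = 0 then 1 else 0

def pvRow (p : Nat) (f : Nat → Int) (j : Nat) : Int :=
  if h : 0 < p ∧ p ≤ j then f j + pvRow p f (j - p) else f j
termination_by j
decreasing_by omega

def pvTbl (ps : List Int) : Nat → Int := ps.foldl (fun f p => pvRow p.toNat f) pvBase

lemma pvRow_of_lt (p : Nat) (f : Nat → Int) (j : Nat) (h : ¬ (0 < p ∧ p ≤ j)) :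
    pvRow p f j = f j := by
  rw [pvRow, dif_neg h]

lemma pvRow_of_le (p : Nat) (f : Nat → Int) (j : Nat) (h1 : 0 < p) (h2 : p ≤ j) :
    pvRow p f j = f j + pvRow p f (j - p) := by
  rw [pvRow, dif_pos ⟨h1, h2⟩]

lemma pvRow_zero (p : Nat) (f : Nat → Int) : pvRow p f 0 = f 0 := by
  rw [pvRow_of_lt]; omega

lemma pvRow_nonneg (p : Nat) (f : Nat → Int) (hf : ∀ t, 0 ≤ f t) (j : Nat) :
    0 ≤ pvRow p f j := by
  induction j using Nat.strong_induction_on with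
  | _ j ih =>
    by_cases h : 0 < p ∧ p ≤ j
    · rw [pvRow_of_le p f j h.1 h.2]
      have := ih (j - p) (by omega)
      have := hf j
      omega
    · rw [pvRow_of_lt p f j h]; exact hf j

lemma pvRow_ge (p : Nat) (f : Nat → Int) (hf : ∀ t, 0 ≤ f t) (j : Nat) :
    f j ≤ pvRow p f j := by
  by_cases h : 0 < p ∧ p ≤ j
  · rw [pvRow_of_le p f j h.1 h.2]
    have := pvRow_nonneg p f hf (j - p)
    omega
  · rw [pvRow_of_lt p f j h]

lemma pvTbl_gen_nonneg (ps : List Int) (f : Nat → Int) (hf : ∀ t, 0 ≤ f t) :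
    ∀ t, 0 ≤ ps.foldl (fun f p => pvRow p.toNat f) f t := by
  induction ps generalizing f with
  | nil => exact hf
  | cons p ps ih => exact ih _ (pvRow_nonneg _ _ hf)

lemma pvTbl_nonneg (ps : List Int) (t : Nat) : 0 ≤ pvTbl ps t :=
  pvTbl_gen_nonneg ps pvBase (fun t => by unfold pvBase; split <;> omega) t

lemma pvTbl_gen_zero (ps : List Int) (f : Nat → Int) (hf : f 0 = 1) :
    ps.foldl (fun f p => pvRow p.toNat f) f 0 = 1 := by
  induction ps generalizing f with
  | nil => exact hf
  | cons p ps ih => exact ih _ (by show pvRow p.toNat f 0 = 1; rw [pvRow_zero]; exact hf)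

lemma pvTbl_zero (ps : List Int) : pvTbl ps 0 = 1 :=
  pvTbl_gen_zero ps pvBase rfl

lemma pvTbl_append (ps : List Int) (p : Int) :
    pvTbl (ps ++ [p]) = pvRow p.toNat (pvTbl ps) := by
  unfold pvTbl; rw [List.foldl_append]; rfl

lemma pvTbl_take_succ (ps : List Int) (k : Nat) (hk : k < ps.length) :
    pvTbl (ps.take (k+1)) = pvRow (ps[k].toNat) (pvTbl (ps.take k)) := by
  rw [List.take_add_one, ← pvTbl_append]
  congr 1
  simp [List.getElem?_eq_getElem hk]

lemma pvTbl_mono (ps : List Int) (i i' : Nat) (h : i ≤ i') (h2 : i' ≤ ps.length) (j : Nat) :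
    pvTbl (ps.take i) j ≤ pvTbl (ps.take i') j := by
  induction i' with
  | zero =>
    have hi0 : i = 0 := by omega
    subst hi0; exact le_refl _
  | succ k ih =>
    rcases Nat.lt_or_ge i (k+1) with hlt | hge
    · have hk : k < ps.length := by omega
      calc pvTbl (ps.take i) j ≤ pvTbl (ps.take k) j := ih (by omega) (by omega)
        _ ≤ pvTbl (ps.take (k+1)) j := by
            rw [pvTbl_take_succ ps k hk]
            exact pvRow_ge _ _ (pvTbl_nonneg _) j
    · have : i = k + 1 := by omega
      subst this; rfl

lemma pvRow_two_base (j : Nat) : pvRow 2 pvBase j = if j % 2 = 0 then 1 else 0 := by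
  induction j using Nat.strong_induction_on with
  | _ j ih =>
    by_cases h : 2 ≤ j
    · rw [pvRow_of_le 2 pvBase j (by omega) h, ih (j - 2) (by omega)]
      have hb : pvBase j = 0 := by unfold pvBase; rw [if_neg (by omega)]
      have : (j - 2) % 2 = j % 2 := by omega
      rw [hb, this]; omega
    · rw [pvRow_of_lt 2 pvBase j (by omega)]
      unfold pvBase
      interval_cases j <;> simp

lemma pvTbl_single_two (j : Nat) : pvTbl [2] j ≤ 1 := by
  have : pvTbl [2] j = pvRow 2 pvBase j := rfl
  rw [this, pvRow_two_base]; split <;> omega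

-- ---------- generic helpers on (List.range n).map f ----------
lemma pv_getD_map_range (n : Nat) (f : Nat → Int) (i : Int) (h0 : 0 ≤ i) (h : i < (n:Int)) :
    PySem.List.pyGetD ((List.range n).map f) i 0 = f i.toNat := by
  rw [PySem.List.pyGetD_eq_getElem _ _ h0 (by simp; omega)]
  simp [List.getElem_map, List.getElem_range]

lemma pv_setD_map_range (n : Nat) (f : Nat → Int) (i : Int) (v : Int)
    (h0 : 0 ≤ i) (h : i < (n:Int)) :
    PySem.List.pySetD ((List.range n).map f) i v
      = (List.range n).map (fun (t : Nat) => if (t:Int) = i then v else f t) := by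
  rw [PySem.List.pySetD_of_nonneg _ _ h0]
  apply List.ext_getElem
  · simp
  · intro t h1 h2
    simp only [List.getElem_set, List.getElem_map, List.getElem_range]
    have h1' : t < n := by simpa using h2
    by_cases ht : (t:Int) = i
    · rw [if_pos (by omega), if_pos ht]
    · rw [if_neg (by omega), if_neg ht]

lemma pv_map_range_congr (n : Nat) (f g : Nat → Int) (h : ∀ t, t < n → f t = g t) :
    (List.range n).map f = (List.range n).map g := by
  apply List.map_congr_left
  intro t ht
  exact h t (List.mem_range.mp ht)

lemma pv_replicate_map_range (n : Nat) : List.replicate n (0:Int) = (List.range n).map (fun _ => 0) := by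
  apply List.ext_getElem <;> simp

lemma pv_counts0 (n : Nat) (hn : 1 ≤ n) :
    PySem.List.pySetD (List.replicate n (0:Int)) 0 1 = (List.range n).map pvBase := by
  rw [pv_replicate_map_range, pv_setD_map_range n _ 0 1 le_rfl (by omega)]
  apply pv_map_range_congr
  intro t ht
  unfold pvBase
  by_cases h : t = 0
  · subst h; simp
  · rw [if_neg (by omega), if_neg h]

-- ---------- B side: one in-place coin pass ----------
lemma pv_passB_aux (n : Nat) (p : Int) (hp : 2 ≤ p) (f : Nat → Int) :
    ∀ (k : Nat), p + k ≤ (n:Int) →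
    (PySem.List.pyRange p (p + k) 1).foldl
        (fun c j => PySem.List.pySetD c j
          (PySem.List.pyGetD c j 0 + PySem.List.pyGetD c (j - p) 0)) ((List.range n).map f)
      = (List.range n).map (fun (t : Nat) => if (t:Int) < p + k then pvRow p.toNat f t else f t) := by
  intro k
  induction k with
  | zero =>
    intro hk
    rw [Nat.cast_zero, add_zero, PySem.List.pyRange_one_eq_nil le_rfl]
    apply pv_map_range_congr
    intro t ht
    by_cases hc : (t:Int) < p
    · rw [if_pos hc, pvRow_of_lt]
      omega
    · rw [if_neg hc]
  | succ k ih =>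
    intro hk
    have hcast : p + ((k+1 : Nat) : Int) = (p + (k:Nat)) + 1 := by push_cast; ring
    rw [hcast, PySem.List.pyRange_one_succ_right (by omega), List.foldl_append, ih (by omega),
      List.foldl_cons, List.foldl_nil]
    have hb1 : (0:Int) ≤ p + (k:Nat) := by omega
    have hb2 : p + ((k:Nat):Int) < (n:Int) := by omega
    rw [pv_getD_map_range n _ _ hb1 hb2]
    have hsub : p + ((k:Nat):Int) - p = ((k:Nat):Int) := by ring
    rw [hsub, pv_getD_map_range n _ _ (by omega) (by omega)]
    have htn : ((p + ((k:Nat):Int)).toNat : Int) = p + ((k:Nat):Int) := by omega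
    rw [if_neg (by omega), if_pos (by omega)]
    set tn := (p + ((k:Nat):Int)).toNat with htdef
    have hval : f tn + pvRow p.toNat f (((k:Nat):Int)).toNat = pvRow p.toNat f tn := by
      rw [pvRow_of_le p.toNat f tn (by omega) (by omega)]
      congr 2
      omega
    rw [hval, pv_setD_map_range n _ _ _ hb1 hb2]
    apply pv_map_range_congr
    intro t ht
    by_cases hc : (t:Int) = p + ((k:Nat):Int)
    · rw [if_pos hc, if_pos (by omega)]
      have : t = tn := by omega
      rw [this]
    · rw [if_neg hc]
      by_cases hc2 : (t:Int) < p + ((k:Nat):Int)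
      · rw [if_pos hc2, if_pos (by omega)]
      · rw [if_neg hc2, if_neg (by omega)]

lemma pv_passB (n : Nat) (p : Int) (hp : 2 ≤ p) (f : Nat → Int) :
    (PySem.List.pyRange p (n:Int) 1).foldl
        (fun c j => PySem.List.pySetD c j
          (PySem.List.pyGetD c j 0 + PySem.List.pyGetD c (j - p) 0)) ((List.range n).map f)
      = (List.range n).map (pvRow p.toNat f) := by
  by_cases hpn : p ≤ (n:Int)
  · have hk : p + ((n:Int) - p).toNat = (n:Int) := by omega
    rw [← hk]
    rw [pv_passB_aux n p hp f ((n:Int) - p).toNat (by omega)]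
    apply pv_map_range_congr
    intro t ht
    rw [if_pos (by omega)]
  · rw [PySem.List.pyRange_one_eq_nil (by omega), List.foldl_nil]
    apply pv_map_range_congr
    intro t ht
    rw [pvRow_of_lt]
    omega

lemma pv_countsB (n : Nat) (ps : List Int) (hps : ∀ p ∈ ps, 2 ≤ p) (f : Nat → Int) :
    ps.foldl (fun c p =>
      (PySem.List.pyRange p (n:Int) 1).foldl
        (fun c j => PySem.List.pySetD c j
          (PySem.List.pyGetD c j 0 + PySem.List.pyGetD c (j - p) 0)) c) ((List.range n).map f)
      = (List.range n).map (ps.foldl (fun f p => pvRow p.toNat f) f) := by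
  induction ps generalizing f with
  | nil => rfl
  | cons p ps ih =>
    simp only [List.foldl_cons]
    rw [pv_passB n p (hps p (by simp)) f]
    exact ih (fun q hq => hps q (by simp [hq])) _

-- ---------- primes shape ----------
lemma pv_filterfold_shape {C : Int → Prop} [DecidablePred C] :
    ∀ (l acc : List Int), ∃ t, l.foldl (fun r n => if C n then r ++ [n] else r) acc = acc ++ t
      ∧ ∀ x ∈ t, x ∈ l := by
  intro l
  induction l with
  | nil => intro acc; exact ⟨[], by simp, by simp⟩
  | cons a l ih =>
    intro acc
    simp only [List.foldl_cons]
    by_cases h : C a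
    · rw [if_pos h]
      obtain ⟨t, ht, hm⟩ := ih (acc ++ [a])
      refine ⟨a :: t, by simpa using ht, ?_⟩
      intro x hx
      rcases List.mem_cons.mp hx with h1 | h1
      · simp [h1]
      · simp [hm x h1]
    · rw [if_neg h]
      obtain ⟨t, ht, hm⟩ := ih acc
      exact ⟨t, ht, fun x hx => by simp [hm x hx]⟩

lemma pv_primes_shape (N : Int) (h3 : 3 ≤ N) :
    ∃ t, (primesSieve N).2 = 2 :: t ∧ ∀ x ∈ t, 3 ≤ x := by
  have h1 : ¬ N < 2 := by omega
  have h2 : ¬ N = 2 := by omega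
  unfold primesSieve
  rw [if_neg h1, if_neg h2]
  dsimp only
  obtain ⟨t, ht, hm⟩ := pv_filterfold_shape
    (C := fun nn => PySem.List.pyGetD (pvSieveLoop N
      (List.foldl (fun s i => PySem.List.pySetD s i true)
        (PySem.List.pySetD (PySem.List.pySetD (List.replicate (N + 1).toNat false) 0 true) 1 true)
        (PySem.List.pyRange 4 (N + 1) 2)) 3) nn true = false)
    (PySem.List.pyRange 3 N 2) [2]
  refine ⟨t, ?_, ?_⟩
  · exact ht
  · intro x hx
    have hx2 := hm x hx
    have := (PySem.List.mem_pyRange_iff_of_pos (by norm_num) x).mp hx2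
    omega

-- ---------- A side: init loops ----------
lemma pv_map_const_pyRange (L : Nat) (x : List Int) :
    (PySem.List.pyRange 0 (L:Int) 1).map (fun _ => x) = List.replicate L x := by
  rw [PySem.List.pyRange_one, List.map_map]
  have : ((L:Int) - 0).toNat = L := by omega
  rw [this]
  apply List.ext_getElem <;> simp

lemma pv_loop1_cons {C : Int → Prop} [DecidablePred C] (js : List Int) :
    ∀ (row : List Int) (rest : List (List Int)),
    js.foldl (fun r i => if C i then
        PySem.List.pySetD r 0 (PySem.List.pySetD (PySem.List.pyGetD r 0 []) i 1) else r)
      (row :: rest)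
      = (js.foldl (fun row i => if C i then PySem.List.pySetD row i 1 else row) row) :: rest := by
  induction js with
  | nil => intro row rest; rfl
  | cons j js ih =>
    intro row rest
    simp only [List.foldl_cons]
    by_cases hC : C j
    · rw [if_pos hC, if_pos hC, PySem.List.pyGetD_zero_cons,
        PySem.List.pySetD_of_nonneg _ _ le_rfl]
      simp only [Int.toNat_zero, List.set_cons_zero]
      exact ih _ rest
    · rw [if_neg hC, if_neg hC]
      exact ih row rest

lemma pv_loop1_row (n : Nat) : ∀ (k : Nat), k ≤ n →
    (PySem.List.pyRange 0 (k:Int) 1).foldl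
        (fun row i => if PySem.Int.mod i 2 = 0 then PySem.List.pySetD row i 1 else row)
        ((List.range n).map (fun _ => (0:Int)))
      = (List.range n).map (fun t => if t < k ∧ t % 2 = 0 then 1 else 0) := by
  intro k
  induction k with
  | zero =>
    intro hk
    rw [Nat.cast_zero, PySem.List.pyRange_one_eq_nil le_rfl, List.foldl_nil]
    apply pv_map_range_congr
    intro t ht
    rw [if_neg (by omega)]
  | succ k ih =>
    intro hk
    have hcast : ((k+1 : Nat) : Int) = ((k:Nat) : Int) + 1 := by push_cast; ring
    rw [hcast, PySem.List.pyRange_one_succ_right (by omega), List.foldl_append, ih (by omega),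
      List.foldl_cons, List.foldl_nil]
    have hmod : PySem.Int.mod ((k:Nat):Int) 2 = (((k % 2 : Nat)):Int) := by
      exact_mod_cast PySem.Int.mod_natCast k 2
    by_cases hk2 : k % 2 = 0
    · rw [if_pos (by rw [hmod]; exact_mod_cast hk2),
        pv_setD_map_range n _ _ _ (by omega) (by omega)]
      apply pv_map_range_congr
      intro t ht
      by_cases hc : (t:Int) = ((k:Nat):Int)
      · rw [if_pos hc, if_pos (by omega)]
      · rw [if_neg hc]
        by_cases hc2 : t < k ∧ t % 2 = 0
        · rw [if_pos hc2, if_pos (by omega)]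
        · rw [if_neg hc2, if_neg (by omega)]
    · rw [if_neg (by rw [hmod]; intro hcon; exact hk2 (by exact_mod_cast hcon))]
      apply pv_map_range_congr
      intro t ht
      by_cases hc2 : t < k ∧ t % 2 = 0
      · rw [if_pos hc2, if_pos (by omega)]
      · rw [if_neg hc2, if_neg (by omega)]

lemma pv_loop2 (h : List Int → List Int) :
    ∀ (r : List (List Int)) (k : Nat), k ≤ r.length →
    (PySem.List.pyRange 0 (k:Int) 1).foldl
        (fun r i => PySem.List.pySetD r i (h (PySem.List.pyGetD r i []))) r
      = (r.take k).map h ++ r.drop k := by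
  intro r k
  induction k with
  | zero =>
    intro hk
    rw [Nat.cast_zero, PySem.List.pyRange_one_eq_nil le_rfl, List.foldl_nil]
    simp
  | succ k ih =>
    intro hk
    have hcast : ((k+1 : Nat) : Int) = ((k:Nat) : Int) + 1 := by push_cast; ring
    rw [hcast, PySem.List.pyRange_one_succ_right (by omega), List.foldl_append, ih (by omega),
      List.foldl_cons, List.foldl_nil]
    have hlen : ((r.take k).map h ++ r.drop k).length = r.length := by
      simp; omega
    have hklt : ((k:Nat):Int) < (((r.take k).map h ++ r.drop k).length : Int) := by
      rw [hlen]; omega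
    rw [PySem.List.pyGetD_eq_getElem _ _ (by omega) hklt,
      PySem.List.pySetD_of_nonneg _ _ (by omega)]
    have htn : ((k:Nat):Int).toNat = k := by omega
    simp only [htn]
    have hk' : k < r.length := by omega
    have hgk : ((r.take k).map h ++ r.drop k)[k]'(by omega) = r[k] := by
      rw [List.getElem_append_right (by simp)]
      simp [List.getElem_drop]
      congr 1
      omega
    rw [hgk]
    apply List.ext_getElem
    · simp; omega
    · intro t h1 h2
      by_cases hc1 : t < k
      · rw [List.getElem_set, if_neg (by omega), List.getElem_append_left (by simp; omega),
          List.getElem_append_left (by simp; omega)]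
        simp [List.getElem_take]
      · by_cases hc2 : t = k
        · subst hc2
          rw [List.getElem_set, if_pos rfl, List.getElem_append_left (by simp; omega)]
          simp [List.getElem_take]
        · rw [List.getElem_set, if_neg (by omega), List.getElem_append_right (by simp; omega),
            List.getElem_append_right (by simp; omega)]
          simp only [List.getElem_drop]
          congr 1
          simp; omega

-- ---------- the min-fold ----------
lemma pv_minFold_le (g : Nat → Int) : ∀ (js : List Int) (a : Int),
    js.foldl (fun a j => if g j.toNat > 5000 then min a j else a) a ≤ a := by
  intro js
  induction js with
  | nil => intro a; simp
  | cons j js ih =>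
    intro a
    simp only [List.foldl_cons]
    split
    · exact le_trans (ih _) (by omega)
    · exact ih a

lemma pv_minFold_le_mem (g : Nat → Int) : ∀ (js : List Int) (a j : Int), j ∈ js →
    g j.toNat > 5000 →
    js.foldl (fun a j => if g j.toNat > 5000 then min a j else a) a ≤ j := by
  intro js
  induction js with
  | nil => intro a j h; simp at h
  | cons x js ih =>
    intro a j hj hg
    simp only [List.foldl_cons]
    rcases List.mem_cons.mp hj with h1 | h1
    · subst h1
      rw [if_pos hg]
      exact le_trans (pv_minFold_le g js _) (by omega)
    · split
      · exact ih _ j h1 hg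
      · exact ih _ j h1 hg

lemma pv_minFold_cases (g : Nat → Int) : ∀ (js : List Int) (a : Int),
    js.foldl (fun a j => if g j.toNat > 5000 then min a j else a) a = a
    ∨ (js.foldl (fun a j => if g j.toNat > 5000 then min a j else a) a ∈ js
       ∧ g (js.foldl (fun a j => if g j.toNat > 5000 then min a j else a) a).toNat > 5000) := by
  intro js
  induction js with
  | nil => intro a; left; rfl
  | cons x js ih =>
    intro a
    simp only [List.foldl_cons]
    by_cases hx : g x.toNat > 5000
    · rw [if_pos hx]
      rcases ih (min a x) with h | h
      · rw [h]
        rcases min_cases a x with ⟨h1, _⟩ | ⟨h1, _⟩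
        · left; exact h1
        · right; rw [h1]; exact ⟨by simp, hx⟩
      · right; exact ⟨by simp [h.1], h.2⟩
    · rw [if_neg hx]
      rcases ih a with h | h
      · left; exact h
      · right; exact ⟨by simp [h.1], h.2⟩

-- ---------- collapse of A's if/elif threshold ----------
lemma pv_anscollapse (s : Bool) (v a j : Int) :
    (if s = false ∧ v - 1 > 5000 then min a j else if v > 5000 then min a j else a)
      = if v > 5000 then min a j else a := by
  split_ifs with h1 h2 h3
  · rfl
  · omega
  · rfl
  · rfl

-- ---------- A side: inner pass and outer loop ----------
lemma pv_passA_aux (n : Nat) (sieve : List Bool) (rows : List (List Int)) (i p : Int)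
    (fprev : Nat → Int) (hi : 1 ≤ i) (hiL : i < (rows.length : Int)) (hp : 2 ≤ p)
    (hf0 : fprev 0 = 1)
    (hprev : PySem.List.pyGetD rows (i-1) [] = (List.range n).map fprev)
    (hcur : PySem.List.pyGetD rows i [] = (List.range n).map pvBase) :
    ∀ (m : Nat), 1 ≤ m → m ≤ n → ∀ (a : Int),
    (PySem.List.pyRange 1 (m:Int) 1).foldl (fun st j =>
        (PySem.List.pySetD st.1 i
          (PySem.List.pySetD (PySem.List.pyGetD st.1 i []) j
            (PySem.List.pyGetD (PySem.List.pyGetD st.1 (i-1) []) j 0 +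
              if j - p ≥ 0 then PySem.List.pyGetD (PySem.List.pyGetD st.1 i []) (j - p) 0
              else 0)),
         if PySem.List.pyGetD sieve j true = false ∧
              (PySem.List.pyGetD (PySem.List.pyGetD st.1 (i-1) []) j 0 +
                if j - p ≥ 0 then PySem.List.pyGetD (PySem.List.pyGetD st.1 i []) (j - p) 0
                else 0) - 1 > 5000 then min st.2 j
         else if (PySem.List.pyGetD (PySem.List.pyGetD st.1 (i-1) []) j 0 +
                if j - p ≥ 0 then PySem.List.pyGetD (PySem.List.pyGetD st.1 i []) (j - p) 0
                else 0) > 5000 then min st.2 j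
         else st.2)) (rows, a)
      = (PySem.List.pySetD rows i ((List.range n).map
            (fun (t : Nat) => if t < m then pvRow p.toNat fprev t else pvBase t)),
         (PySem.List.pyRange 1 (m:Int) 1).foldl
            (fun a j => if pvRow p.toNat fprev j.toNat > 5000 then min a j else a) a) := by
  have hlen : (0:Int) ≤ i ∧ i < (rows.length : Int) := ⟨by omega, hiL⟩
  have hgetI : rows[i.toNat]'(by omega) = (List.range n).map pvBase := by
    rw [← PySem.List.pyGetD_eq_getElem rows [] (by omega) hiL]; exact hcur
  have hgetP : rows[(i-1).toNat]'(by omega) = (List.range n).map fprev := by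
    rw [← PySem.List.pyGetD_eq_getElem rows [] (by omega) (by omega)]; exact hprev
  intro m
  induction m with
  | zero => intro h; omega
  | succ m ih =>
    intro h1 hm a
    rcases Nat.eq_or_lt_of_le h1 with hbase | hstep
    · -- base case m + 1 = 1
      have hm0 : m = 0 := by omega
      subst hm0
      rw [Nat.cast_one, PySem.List.pyRange_one_eq_nil le_rfl, List.foldl_nil, List.foldl_nil]
      have hmap : (List.range n).map (fun (t : Nat) => if t < 1 then pvRow p.toNat fprev t else pvBase t)
          = (List.range n).map pvBase := by
        apply pv_map_range_congr
        intro t ht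
        by_cases hc : t < 1
        · have ht0 : t = 0 := by omega
          subst ht0
          rw [if_pos hc, pvRow_zero, hf0]; rfl
        · rw [if_neg hc]
      rw [hmap, PySem.List.pySetD_of_nonneg _ _ (by omega), ← hgetI, List.set_getElem_self]
    · -- inductive step, 1 ≤ m
      have h1m : 1 ≤ m := by omega
      have hcast : ((m+1 : Nat) : Int) = ((m:Nat) : Int) + 1 := by push_cast; ring
      rw [hcast, PySem.List.pyRange_one_succ_right (by omega), List.foldl_append,
        List.foldl_append, ih h1m (by omega) a, List.foldl_cons, List.foldl_nil,
        List.foldl_cons, List.foldl_nil]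
      set cutm := fun (t : Nat) => if t < m then pvRow p.toNat fprev t else pvBase t with hcut
      set rows' := PySem.List.pySetD rows i ((List.range n).map cutm) with hrows'
      have hlen' : rows'.length = rows.length := PySem.List.length_pySetD _ _ _
      have hg1 : PySem.List.pyGetD rows' (i-1) [] = (List.range n).map fprev := by
        rw [hrows', PySem.List.pySetD_of_nonneg _ _ (by omega),
          PySem.List.pyGetD_eq_getElem _ [] (by omega) (by rw [List.length_set]; omega)]
        rw [List.getElem_set, if_neg (by omega)]
        exact hgetP
      have hg2 : PySem.List.pyGetD rows' i [] = (List.range n).map cutm := by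
        rw [hrows', PySem.List.pySetD_of_nonneg _ _ (by omega),
          PySem.List.pyGetD_eq_getElem _ [] (by omega) (by rw [List.length_set]; omega)]
        rw [List.getElem_set, if_pos rfl]
      dsimp only
      rw [hg1, hg2]
      have hmn : ((m:Nat):Int) < (n:Int) := by omega
      rw [pv_getD_map_range n fprev ((m:Nat):Int) (by omega) hmn]
      have hval : fprev ((m:Nat):Int).toNat +
          (if ((m:Nat):Int) - p ≥ 0 then
            PySem.List.pyGetD ((List.range n).map cutm) (((m:Nat):Int) - p) 0 else 0)
          = pvRow p.toNat fprev m := by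
        by_cases hc : ((m:Nat):Int) - p ≥ 0
        · rw [if_pos hc, pv_getD_map_range n cutm _ (by omega) (by omega)]
          rw [hcut]
          simp only []
          rw [if_pos (by omega)]
          rw [pvRow_of_le p.toNat fprev m (by omega) (by omega)]
          have : (((m:Nat):Int) - p).toNat = m - p.toNat := by omega
          rw [this]
          simp
        · rw [if_neg hc, pvRow_of_lt p.toNat fprev m (by omega)]
          have : ((m:Nat):Int).toNat = m := by omega
          rw [this, add_zero]
      rw [hval]
      simp only [Prod.mk.injEq]
      refine ⟨?_, ?_⟩
      · -- rows component
        rw [hrows', PySem.List.pySetD_of_nonneg rows _ (by omega),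
          PySem.List.pySetD_of_nonneg _ _ (by omega), List.set_set,
          pv_setD_map_range n cutm _ _ (by omega) hmn,
          PySem.List.pySetD_of_nonneg rows _ (by omega)]
        congr 1
        apply pv_map_range_congr
        intro t ht
        by_cases hc : (t:Int) = ((m:Nat):Int)
        · have htm : t = m := by omega
          subst htm
          rw [if_pos hc, if_pos (by omega)]
        · rw [if_neg hc, hcut]
          simp only []
          by_cases hc2 : t < m
          · rw [if_pos hc2, if_pos (by omega)]
          · rw [if_neg hc2, if_neg (by omega)]
      · -- ans component
        rw [pv_anscollapse (PySem.List.pyGetD sieve ((m:Nat):Int) true)]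
        have : ((m:Nat):Int).toNat = m := by omega
        rw [this]

-- rows of A's table after the first k outer iterations
def pvRows (P : List Int) (n k : Nat) : List (List Int) :=
  (List.range P.length).map (fun i => if i < k then (List.range n).map (pvTbl (P.take (i+1)))
    else (List.range n).map pvBase)

lemma pvRows_length (P : List Int) (n k : Nat) : (pvRows P n k).length = P.length := by
  simp [pvRows]

lemma pvRows_get (P : List Int) (n k i : Nat) (hi : i < P.length) :
    (pvRows P n k)[i]'(by rw [pvRows_length]; exact hi)
      = if i < k then (List.range n).map (pvTbl (P.take (i+1))) else (List.range n).map pvBase := by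
  simp [pvRows]

lemma pvRows_set (P : List Int) (n k : Nat) (hk : k < P.length) :
    (pvRows P n k).set k ((List.range n).map (pvTbl (P.take (k+1)))) = pvRows P n (k+1) := by
  apply List.ext_getElem
  · simp [pvRows]
  · intro i h1 h2
    have hiP : i < P.length := by simpa [pvRows] using h2
    rw [List.getElem_set]
    by_cases hc : k = i
    · subst hc
      rw [if_pos rfl, pvRows_get P n (k+1) k hiP, if_pos (by omega)]
    · rw [if_neg hc, pvRows_get P n k i hiP, pvRows_get P n (k+1) i hiP]
      by_cases hc2 : i < k
      · rw [if_pos hc2, if_pos (by omega)]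
      · rw [if_neg hc2, if_neg (by omega)]

lemma pv_outerA (n : Nat) (sieve : List Bool) (P : List Int) (hP2 : ∀ p ∈ P, 2 ≤ p)
    (hn : 2 ≤ n) :
    ∀ (k : Nat), 1 ≤ k → k ≤ P.length → ∀ (a : Int),
    (PySem.List.pyRange 1 (k:Int) 1).foldl (fun st i =>
        (PySem.List.pyRange 1 (n:Int) 1).foldl (fun st j =>
          (PySem.List.pySetD st.1 i
            (PySem.List.pySetD (PySem.List.pyGetD st.1 i []) j
              (PySem.List.pyGetD (PySem.List.pyGetD st.1 (i-1) []) j 0 +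
                if j - PySem.List.pyGetD P i 0 ≥ 0 then
                  PySem.List.pyGetD (PySem.List.pyGetD st.1 i []) (j - PySem.List.pyGetD P i 0) 0
                else 0)),
           if PySem.List.pyGetD sieve j true = false ∧
                (PySem.List.pyGetD (PySem.List.pyGetD st.1 (i-1) []) j 0 +
                  if j - PySem.List.pyGetD P i 0 ≥ 0 then
                    PySem.List.pyGetD (PySem.List.pyGetD st.1 i []) (j - PySem.List.pyGetD P i 0) 0
                  else 0) - 1 > 5000 then min st.2 j
           else if (PySem.List.pyGetD (PySem.List.pyGetD st.1 (i-1) []) j 0 +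
                  if j - PySem.List.pyGetD P i 0 ≥ 0 then
                    PySem.List.pyGetD (PySem.List.pyGetD st.1 i []) (j - PySem.List.pyGetD P i 0) 0
                  else 0) > 5000 then min st.2 j
           else st.2)) st) (pvRows P n 1, a)
      = (pvRows P n k,
         (PySem.List.pyRange 1 (k:Int) 1).foldl (fun a i =>
           (PySem.List.pyRange 1 (n:Int) 1).foldl
             (fun a j => if pvTbl (P.take (i.toNat+1)) j.toNat > 5000 then min a j else a) a) a) := by
  intro k
  induction k with
  | zero => intro h; omega
  | succ k ih =>
    intro h1 hkL a
    rcases Nat.eq_or_lt_of_le h1 with hbase | hstep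
    · have hk0 : k = 0 := by omega
      subst hk0
      rw [Nat.cast_one, PySem.List.pyRange_one_eq_nil le_rfl, List.foldl_nil, List.foldl_nil]
    · have h1k : 1 ≤ k := by omega
      have hkP : k < P.length := by omega
      have hcast : ((k+1 : Nat) : Int) = ((k:Nat) : Int) + 1 := by push_cast; ring
      rw [hcast, PySem.List.pyRange_one_succ_right (by omega), List.foldl_append,
        List.foldl_append, ih h1k (by omega) a, List.foldl_cons, List.foldl_nil,
        List.foldl_cons, List.foldl_nil]
      have hpk : PySem.List.pyGetD P ((k:Nat):Int) 0 = P[k] := by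
        rw [PySem.List.pyGetD_eq_getElem P 0 (by omega) (by omega)]
        exact getElem_congr rfl (by omega) (by omega)
      have hp2 : 2 ≤ PySem.List.pyGetD P ((k:Nat):Int) 0 := by
        rw [hpk]; exact hP2 _ (List.getElem_mem hkP)
      have hprev : PySem.List.pyGetD (pvRows P n k) (((k:Nat):Int)-1) []
          = (List.range n).map (pvTbl (P.take k)) := by
        rw [PySem.List.pyGetD_eq_getElem _ [] (by omega) (by rw [pvRows_length]; omega)]
        have htk : (((k:Nat):Int)-1).toNat = k - 1 := by omega
        simp only [htk]
        rw [pvRows_get P n k (k-1) (by omega), if_pos (by omega)]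
        have hk1 : k - 1 + 1 = k := by omega
        rw [hk1]
      have hcur : PySem.List.pyGetD (pvRows P n k) ((k:Nat):Int) []
          = (List.range n).map pvBase := by
        rw [PySem.List.pyGetD_eq_getElem _ [] (by omega) (by rw [pvRows_length]; omega)]
        have htk : (((k:Nat):Int)).toNat = k := by omega
        simp only [htk]
        rw [pvRows_get P n k k (by omega), if_neg (by omega)]
      rw [pv_passA_aux n sieve (pvRows P n k) ((k:Nat):Int) _ (pvTbl (P.take k))
        (by omega) (by rw [pvRows_length]; omega) hp2 (pvTbl_zero _) hprev hcur n (by omega) le_rfl]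
      have hfun : pvRow (PySem.List.pyGetD P ((k:Nat):Int) 0).toNat (pvTbl (P.take k))
          = pvTbl (P.take (k+1)) := by
        rw [hpk, pvTbl_take_succ P k hkP]
      simp only [Prod.mk.injEq]
      refine ⟨?_, ?_⟩
      · rw [PySem.List.pySetD_of_nonneg _ _ (by omega)]
        have htk : (((k:Nat):Int)).toNat = k := by omega
        rw [htk]
        have hmap : (List.range n).map
            (fun (t : Nat) => if t < n then pvRow (PySem.List.pyGetD P ((k:Nat):Int) 0).toNat
              (pvTbl (P.take k)) t else pvBase t)
            = (List.range n).map (pvTbl (P.take (k+1))) := by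
          apply pv_map_range_congr
          intro t ht
          rw [if_pos ht, hfun]
        rw [hmap, pvRows_set P n k hkP]
      · have htk : (((k:Nat):Int)).toNat = k := by omega
        rw [hfun, htk]

-- nested min-fold produces either its initial value or a hit of the final table
lemma pv_outer_cases (G : Nat → Int) (gs : Int → Nat → Int) (js : List Int) :
    ∀ (is : List Int), (∀ i ∈ is, ∀ t, gs i t ≤ G t) → ∀ (a : Int),
    (is.foldl (fun a i => js.foldl (fun a j => if gs i j.toNat > 5000 then min a j else a) a) a) = a
    ∨ ((is.foldl (fun a i => js.foldl (fun a j => if gs i j.toNat > 5000 then min a j else a) a) a) ∈ js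
       ∧ G (is.foldl (fun a i => js.foldl (fun a j => if gs i j.toNat > 5000 then min a j else a) a) a).toNat > 5000) := by
  intro is
  induction is with
  | nil => intro _ a; left; rfl
  | cons i is ih =>
    intro hmono a
    simp only [List.foldl_cons]
    rcases ih (fun i hi => hmono i (by simp [hi]))
        (js.foldl (fun a j => if gs i j.toNat > 5000 then min a j else a) a) with h | h
    · rw [h]
      rcases pv_minFold_cases (gs i) js a with h2 | h2
      · left; exact h2
      · right
        exact ⟨h2.1, lt_of_lt_of_le h2.2 (hmono i (by simp) _)⟩
    · right; exact h

theorem pv_main (N : Int) (h3 : 3 ≤ N) : solve N = solve_alt N := by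
  obtain ⟨t, hP, hT⟩ := pv_primes_shape N h3
  have hP2 : ∀ p ∈ (2 :: t : List Int), 2 ≤ p := by
    intro p hp
    rcases List.mem_cons.mp hp with h | h
    · omega
    · have := hT p h; omega
  simp only [solve, solve_alt]
  set n := (N+1).toNat with hn
  have hnN : N + 1 = ((n:Nat):Int) := by omega
  rw [hnN, hP]
  simp only [List.length_cons]
  have hn4 : 4 ≤ n := by omega
  -- ===== B side =====
  rw [pv_counts0 n (by omega), pv_countsB n (2::t) hP2 pvBase]
  have hTblDef : (2::t : List Int).foldl (fun f p => pvRow p.toNat f) pvBase = pvTbl (2::t) := rfl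
  rw [hTblDef]
  -- ===== A side: init =====
  rw [pv_map_const_pyRange (t.length + 1) (List.replicate n 0), List.replicate_succ,
    pv_replicate_map_range n,
    pv_loop1_cons (C := fun i => PySem.Int.mod i 2 = 0) (PySem.List.pyRange 0 ((n:Nat):Int) 1)
      ((List.range n).map (fun _ => (0:Int))) (List.replicate t.length ((List.range n).map (fun _ => (0:Int)))),
    pv_loop1_row n n le_rfl]
  set ev := fun (tt : Nat) => if tt < n ∧ tt % 2 = 0 then (1:Int) else 0 with hev
  rw [pv_loop2 (fun row => PySem.List.pySetD row 0 1)
      (((List.range n).map ev) :: List.replicate t.length ((List.range n).map (fun _ => (0:Int))))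
      (t.length + 1) (by simp)]
  have hlenr : (((List.range n).map ev) :: List.replicate t.length ((List.range n).map (fun _ => (0:Int)))).length = t.length + 1 := by simp
  rw [← hlenr, List.take_length, List.drop_length, List.append_nil, List.map_cons, List.map_replicate]
  rw [hlenr]
  have hrow0 : PySem.List.pySetD ((List.range n).map ev) 0 1 = (List.range n).map (pvTbl [2]) := by
    rw [PySem.List.pySetD_of_nonneg _ _ le_rfl]
    rw [show ((0:Int).toNat) = 0 from rfl]
    rw [show ((List.range n).map ev).set 0 (1:Int) = PySem.List.pySetD ((List.range n).map ev) 0 1 from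
      (PySem.List.pySetD_of_nonneg _ _ le_rfl).symm]
    rw [pv_setD_map_range n ev 0 1 le_rfl (by omega)]
    apply pv_map_range_congr
    intro s hs
    have hs2 : pvTbl [2] s = pvRow 2 pvBase s := rfl
    rw [hs2, pvRow_two_base, hev]
    simp only []
    by_cases hc : (s:Int) = 0
    · rw [if_pos hc, if_pos (by omega)]
    · rw [if_neg hc]
      by_cases hc2 : s < n ∧ s % 2 = 0
      · rw [if_pos hc2, if_pos (by omega)]
      · rw [if_neg hc2, if_neg (by omega)]
  have hzrow : PySem.List.pySetD ((List.range n).map (fun _ => (0:Int))) 0 1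
      = (List.range n).map pvBase := by
    rw [← pv_replicate_map_range n]
    exact pv_counts0 n (by omega)
  rw [hrow0, hzrow]
  have hrows1 : pvRows (2::t) n 1
      = ((List.range n).map (pvTbl [2])) :: List.replicate t.length ((List.range n).map pvBase) := by
    apply List.ext_getElem
    · simp [pvRows]
    · intro i h1 h2
      have hiP : i < (2::t : List Int).length := by
        have := h1; rw [pvRows_length] at this; exact this
      match i with
      | 0 =>
        rw [pvRows_get (2::t) n 1 0 hiP, if_pos (by omega)]
        simp
      | (i+1 : Nat) =>
        rw [pvRows_get (2::t) n 1 (i+1) hiP, if_neg (by omega)]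
        simp only [List.getElem_cons_succ]
        rw [List.getElem_replicate]
  rw [← hrows1]
  -- ===== A side: outer loop =====
  rw [pv_outerA n (primesSieve N).1 (2::t) hP2 (by omega) (t.length + 1) (by omega) (by simp)
    ((n:Nat):Int)]
  -- ===== final comparison =====
  set js := PySem.List.pyRange 1 ((n:Nat):Int) 1 with hjs
  set isL := PySem.List.pyRange 1 ((t.length + 1 : Nat):Int) 1 with hisL
  set G := pvTbl (2::t) with hG
  have hpred : ∀ j ∈ js, ((PySem.List.pyGetD ((List.range n).map G) j 0 > 5000) ↔ G j.toNat > 5000) := by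
    intro j hj
    have hb := (PySem.List.mem_pyRange_one).mp hj
    rw [pv_getD_map_range n G j (by omega) (by omega)]
  have hmono : ∀ i ∈ isL, ∀ s : Nat, pvTbl ((2::t : List Int).take (i.toNat+1)) s ≤ G s := by
    intro i hi s
    have hb := (PySem.List.mem_pyRange_one).mp hi
    have h2 : i.toNat + 1 ≤ (2::t : List Int).length := by simp; omega
    have := pvTbl_mono (2::t) (i.toNat+1) ((2::t : List Int).length) h2 le_rfl s
    rwa [List.take_length] at this
  simp only []
  cases hfind : js.find? (fun j => decide (PySem.List.pyGetD ((List.range n).map G) j 0 > 5000)) with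
  | none =>
    rw [Option.getD_none]
    have hnohit : ∀ j ∈ js, ¬ (G j.toNat > 5000) := by
      intro j hj hcon
      have := List.find?_eq_none.mp hfind j hj
      simp only [decide_eq_true_eq] at this
      exact this ((hpred j hj).mpr hcon)
    rcases pv_outer_cases G (fun i => pvTbl ((2::t : List Int).take (i.toNat+1))) js isL hmono
        ((n:Nat):Int) with h | ⟨hmem, hhit⟩
    · exact h
    · exact absurd hhit (hnohit _ hmem)
  | some j0 =>
    rw [Option.getD_some]
    obtain ⟨hpj0, as, bs, hsplit, hbefore⟩ := List.find?_eq_some_iff_append.mp hfind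
    have hj0mem : j0 ∈ js := by rw [hsplit]; simp
    have hj0b := (PySem.List.mem_pyRange_one).mp hj0mem
    have hhit0 : G j0.toNat > 5000 := by
      have := of_decide_eq_true hpj0
      exact (hpred j0 hj0mem).mp this
    have hminimal : ∀ y ∈ js, G y.toNat > 5000 → j0 ≤ y := by
      intro y hy hyhit
      have hy2 := hy
      rw [hsplit] at hy2
      rcases List.mem_append.mp hy2 with hya | hyb
      · exfalso
        have := hbefore y hya
        simp only [Bool.not_eq_eq_eq_not, Bool.not_true, decide_eq_false_iff_not] at this
        exact this ((hpred y hy).mpr hyhit)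
      · rcases List.mem_cons.mp hyb with h | h
        · omega
        · have hpw : js.Pairwise (· < ·) := by
            rw [hjs]; exact PySem.List.pairwise_lt_pyRange_one _ _
          rw [hsplit] at hpw
          have := ((List.pairwise_append.mp hpw).2.1)
          have := (List.pairwise_cons.mp this).1 y h
          omega
    by_cases hL0 : t.length = 0
    · exfalso
      have ht0 : t = [] := List.eq_nil_of_length_eq_zero hL0
      subst ht0
      have := pvTbl_single_two j0.toNat
      rw [hG] at hhit0
      omega
    · -- split off the last outer iteration
      have hsp : ((t.length + 1 : Nat):Int) = ((t.length : Nat):Int) + 1 := by push_cast; ring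
      rcases pv_outer_cases G (fun i => pvTbl ((2::t : List Int).take (i.toNat+1))) js isL hmono
          ((n:Nat):Int) with hcase | ⟨hmem, hhit⟩
      · -- fold returned N+1; but it is ≤ j0 < N+1, contradiction unless equality forced
        rw [hcase]
        exfalso
        have hub : isL.foldl (fun a i => js.foldl
            (fun a j => if pvTbl ((2::t : List Int).take (i.toNat+1)) j.toNat > 5000 then min a j else a) a)
            ((n:Nat):Int) ≤ j0 := by
          rw [hisL, hsp, PySem.List.pyRange_one_succ_right (by omega), List.foldl_append,
            List.foldl_cons, List.foldl_nil]
          have hlast : pvTbl ((2::t : List Int).take ((((t.length:Nat):Int)).toNat + 1)) = G := by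
            rw [hG]
            congr 1
            rw [Int.toNat_natCast]
            apply List.take_of_length_le
            simp
          rw [hlast]
          exact pv_minFold_le_mem G js _ j0 hj0mem hhit0
        rw [hisL] at hcase
        rw [hcase] at hub
        omega
      · exact le_antisymm
          (by
            have hub : isL.foldl (fun a i => js.foldl
                (fun a j => if pvTbl ((2::t : List Int).take (i.toNat+1)) j.toNat > 5000 then min a j else a) a)
                ((n:Nat):Int) ≤ j0 := by
              rw [hisL, hsp, PySem.List.pyRange_one_succ_right (by omega), List.foldl_append,
                List.foldl_cons, List.foldl_nil]
              have hlast : pvTbl ((2::t : List Int).take ((((t.length:Nat):Int)).toNat + 1)) = G := by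
                rw [hG]
                congr 1
                rw [Int.toNat_natCast]
                apply List.take_of_length_le
                simp
              rw [hlast]
              exact pv_minFold_le_mem G js _ j0 hj0mem hhit0
            rw [hisL] at hub
            exact hub)
          (hminimal _ hmem hhit)

-- ===== VERDICT (by name: the statement is the Claim_ definition above) =====
theorem solve_spec : Claim_equal_solve := by
  unfold Claim_equal_solve
  intro N _ hpre
  unfold Spec_solve
  exact pv_main N hpre
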